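-- pv_equiv track=rewrite | github.com/tecer-ai/rbtv | _config/bootstrap/workflows/project.py | _check_prefix_conflicts
-- ===== SOURCE A (Python) =====
-- def _check_prefix_conflicts(projects: list) -> list:
--     seen = {}
--     errors = []
--     for name, _, config in projects:
--         prefix = config.get("managed_prefix", "")
--         if not prefix:
--             continue
--         if prefix in seen:
--             errors.append(
--                 f"Prefix conflict: '{prefix}' is used by both "
--                 f"'{seen[prefix]}' and '{name}'"
--             )
--         else:
--             seen[prefix] = name
--     return errors
-- ===== SOURCE B (Python) =====
-- def _check_prefix_conflicts(projects: list) -> list: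
--     # Pass 1: record, for each non-empty prefix, the index and name of its first occurrence.
--     first_seen = {}
--     for i, (name, _, config) in enumerate(projects):
--         prefix = config.get("managed_prefix", "")
--         if prefix and prefix not in first_seen:
--             first_seen[prefix] = (i, name)
--     # Pass 2: every non-empty-prefix occurrence that is not the recorded first one is a conflict.
--     errors = []
--     for i, (name, _, config) in enumerate(projects):
--         prefix = config.get("managed_prefix", "")
--         if not prefix:
--             continue
--         fi, fname = first_seen[prefix]
--         if i != fi:
--             errors.append(
--                 f"Prefix conflict: '{prefix}' is used by both "
--                 f"'{fname}' and '{name}'"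
--             )
--     return errors
-- ===== Notes on version B (the rewrite author's own statement) =====
-- stated objective: alternative
-- what changed: Replaced the single stateful pass (grow a seen dict while emitting errors) by two passes: one pass records the index and name of the first occurrence of each non-empty prefix, a second index-based pass emits an error for every occurrence whose index differs from the recorded first index.
import Mathlib
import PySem

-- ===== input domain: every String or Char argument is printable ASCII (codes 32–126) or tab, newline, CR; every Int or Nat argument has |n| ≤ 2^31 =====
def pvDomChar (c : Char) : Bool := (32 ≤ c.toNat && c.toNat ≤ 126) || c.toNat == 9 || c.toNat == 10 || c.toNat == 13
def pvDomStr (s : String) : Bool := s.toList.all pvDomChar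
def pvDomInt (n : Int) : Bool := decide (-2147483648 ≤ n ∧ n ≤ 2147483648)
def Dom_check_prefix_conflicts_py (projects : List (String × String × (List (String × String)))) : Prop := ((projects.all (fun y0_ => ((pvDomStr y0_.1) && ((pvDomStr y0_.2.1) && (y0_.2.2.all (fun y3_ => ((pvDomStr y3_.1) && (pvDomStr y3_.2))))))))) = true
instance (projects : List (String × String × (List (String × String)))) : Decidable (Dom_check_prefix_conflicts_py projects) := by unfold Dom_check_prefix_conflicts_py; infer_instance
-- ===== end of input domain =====

-- B replaces A's single stateful pass by two passes: record each non-empty prefix's first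
-- occurrence (index, name), then emit an error for every occurrence at a different index.

-- shared by both ports: the f-string and config.get("managed_prefix", "")
def pvMsg (pfx first name : String) : String :=
  "Prefix conflict: '" ++ pfx ++ "' is used by both '" ++ first ++ "' and '" ++ name ++ "'"

def pvPrefixOf (config : List (String × String)) : String :=
  PySem.Dict.getD (PySem.Dict.mk config) "managed_prefix" ""

-- ===== PORT A =====
-- A's loop body: seen/errors state, one project at a time
def pvStepA (st : PySem.Dict String String × List String)
    (item : String × String × (List (String × String))) :
    PySem.Dict String String × List String :=
  let pfx := pvPrefixOf item.2.2
  if pfx = "" then st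
  else
    match st.1.get? pfx with
    | some first => (st.1, st.2 ++ [pvMsg pfx first item.1])
    | none => (st.1.insert pfx item.1, st.2)

def check_prefix_conflicts_py (projects : List (String × String × (List (String × String)))) : List String :=
  (projects.foldl pvStepA (PySem.Dict.empty, [])).2

-- ===== PORT B =====
-- B pass 1 body: first_seen[prefix] = (i, name) for the first non-empty occurrence
def pvStepFS (fs : PySem.Dict String (Int × String))
    (e : Int × String × String × (List (String × String))) :
    PySem.Dict String (Int × String) :=
  let pfx := pvPrefixOf e.2.2.2
  if pfx = "" then fs
  else if fs.contains pfx then fs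
  else fs.insert pfx (e.1, e.2.1)

def pvFirstSeen (projects : List (String × String × (List (String × String)))) :
    PySem.Dict String (Int × String) :=
  (PySem.List.enumerate projects 0).foldl pvStepFS PySem.Dict.empty

-- B pass 2 body: emit when the current index is not the recorded first index
def pvStepEmit (fs : PySem.Dict String (Int × String)) (errors : List String)
    (e : Int × String × String × (List (String × String))) : List String :=
  let pfx := pvPrefixOf e.2.2.2
  if pfx = "" then errors
  else
    match fs.get? pfx with
    | some fi => if e.1 ≠ fi.1 then errors ++ [pvMsg pfx fi.2 e.2.1] else errors
    | none => errors  -- unreachable: pass 1 records every non-empty prefix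

def check_prefix_conflicts_py_alt (projects : List (String × String × (List (String × String)))) : List String :=
  (PySem.List.enumerate projects 0).foldl (pvStepEmit (pvFirstSeen projects)) []

-- ===== PRECONDITION & SPEC =====
def Spec_check_prefix_conflicts_py (projects : List (String × String × (List (String × String)))) (out : List String) : Prop := out = check_prefix_conflicts_py_alt projects
instance (projects : List (String × String × (List (String × String)))) (out : List String) : Decidable (Spec_check_prefix_conflicts_py projects out) := by unfold Spec_check_prefix_conflicts_py; infer_instance

-- ===== CLAIM (what is proved, stated in full; the proofs are below) =====
def Claim_equal_check_prefix_conflicts_py : Prop := ∀ (projects : List (String × String × (List (String × String)))), Dom_check_prefix_conflicts_py projects → Spec_check_prefix_conflicts_py projects (check_prefix_conflicts_py projects)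

-- ===== LEMMAS AND PROOFS =====

-- first occurrence (index from s, name) of prefix p in l
def pvFirstIn (s : Int) (l : List (String × String × (List (String × String)))) (p : String) :
    Option (Int × String) :=
  match l with
  | [] => none
  | it :: rest => if pvPrefixOf it.2.2 = p then some (s, it.1) else pvFirstIn (s + 1) rest p

theorem pvFirstIn_append (l₁ l₂ : List (String × String × (List (String × String))))
    (s : Int) (p : String) :
    pvFirstIn s (l₁ ++ l₂) p = (pvFirstIn s l₁ p).or (pvFirstIn (s + l₁.length) l₂ p) := by
  induction l₁ generalizing s with
  | nil => simp [pvFirstIn]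
  | cons it rest ih =>
    simp only [List.cons_append, pvFirstIn]
    by_cases h : pvPrefixOf it.2.2 = p
    · simp [h, Option.or]
    · simp only [h, if_false, ih]
      congr 2
      simp only [List.length_cons]
      push_cast
      omega

theorem pvFirstIn_bounds (l : List (String × String × (List (String × String))))
    (s : Int) (p : String) (r : Int × String) (h : pvFirstIn s l p = some r) :
    s ≤ r.1 ∧ r.1 < s + l.length := by
  induction l generalizing s with
  | nil => simp [pvFirstIn] at h
  | cons it rest ih =>
    simp only [pvFirstIn] at h
    by_cases hp : pvPrefixOf it.2.2 = p
    · rw [if_pos hp] at h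
      cases h
      show s ≤ s ∧ s < s + ((rest.length + 1 : Nat) : Int)
      omega
    · rw [if_neg hp] at h
      obtain ⟨h1, h2⟩ := ih (s + 1) h
      refine ⟨by omega, ?_⟩
      have hl : ((it :: rest).length : Int) = (rest.length : Int) + 1 := by simp
      omega

-- pass 1 computes pvFirstIn
theorem pvFS_char (l : List (String × String × (List (String × String))))
    (s : Int) (d : PySem.Dict String (Int × String)) (p : String) (hp : p ≠ "") :
    ((PySem.List.enumerate l s).foldl pvStepFS d).get? p = (d.get? p).or (pvFirstIn s l p) := by
  induction l generalizing s d with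
  | nil =>
    rw [PySem.List.enumerate_nil]
    simp only [List.foldl_nil, pvFirstIn]
    cases d.get? p <;> simp [Option.or]
  | cons it rest ih =>
    rw [PySem.List.enumerate_cons]
    simp only [List.foldl_cons, pvFirstIn]
    by_cases h0 : pvPrefixOf it.2.2 = ""
    · have hne : pvPrefixOf it.2.2 ≠ p := by rw [h0]; exact fun h => hp h.symm
      simp [pvStepFS, h0, ih, hp]
    · by_cases hc : d.contains (pvPrefixOf it.2.2)
      · -- already present: no insert
        simp only [pvStepFS, h0, if_false, hc, if_true, ih]
        by_cases he : pvPrefixOf it.2.2 = p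
        · -- d.get? p is some, so .or absorbs both continuations
          subst he
          rw [PySem.Dict.contains_eq_isSome_get?] at hc
          obtain ⟨v, hv⟩ := Option.isSome_iff_exists.mp hc
          simp [hv, Option.or]
        · simp [he]
      · simp only [pvStepFS, h0, if_false, hc, Bool.false_eq_true, if_false, ih]
        by_cases he : pvPrefixOf it.2.2 = p
        · subst he
          rw [PySem.Dict.contains_eq_isSome_get?] at hc
          have hd : d.get? (pvPrefixOf it.2.2) = none := by
            cases hdd : d.get? (pvPrefixOf it.2.2) <;> simp [hdd] at hc ⊢
          simp [PySem.Dict.get?_insert_self, hd, Option.or]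
        · rw [PySem.Dict.get?_insert_of_ne _ _ (fun h => he h.symm)]
          simp [he]

theorem pvFirstSeen_char (projects : List (String × String × (List (String × String))))
    (p : String) (hp : p ≠ "") :
    (pvFirstSeen projects).get? p = pvFirstIn 0 projects p := by
  rw [pvFirstSeen, pvFS_char _ _ _ _ hp]
  simp [Option.or]

-- B's error list for one enumerated entry, with the full first_seen dict
def pvEmit1 (fs : PySem.Dict String (Int × String))
    (e : Int × String × String × (List (String × String))) : List String :=
  let pfx := pvPrefixOf e.2.2.2
  if pfx = "" then []
  else
    match fs.get? pfx with
    | some fi => if e.1 ≠ fi.1 then [pvMsg pfx fi.2 e.2.1] else []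
    | none => []

theorem pvStepEmit_eq (fs : PySem.Dict String (Int × String)) (errors : List String)
    (e : Int × String × String × (List (String × String))) :
    pvStepEmit fs errors e = errors ++ pvEmit1 fs e := by
  simp only [pvStepEmit, pvEmit1]
  by_cases h1 : pvPrefixOf e.2.2.2 = ""
  · simp [h1]
  · simp only [h1, if_false]
    cases fs.get? (pvPrefixOf e.2.2.2) with
    | none => simp
    | some fi => by_cases h2 : e.1 = fi.1 <;> simp [h2]

theorem pvFoldEmit (fs : PySem.Dict String (Int × String))
    (l : List (Int × String × String × (List (String × String)))) (acc : List String) :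
    l.foldl (pvStepEmit fs) acc = acc ++ l.flatMap (pvEmit1 fs) := by
  induction l generalizing acc with
  | nil => simp
  | cons e rest ih => simp [pvStepEmit_eq, ih]

-- main invariant-carrying lemma: A's loop over the remaining suffix produces B's emissions
theorem pvMain (projects : List (String × String × (List (String × String)))) :
    ∀ (rest done : List (String × String × (List (String × String))))
      (seen : PySem.Dict String String) (errs : List String),
      projects = done ++ rest →
      (∀ q, q ≠ "" → seen.get? q = (pvFirstIn 0 done q).map (·.2)) →
      (rest.foldl pvStepA (seen, errs)).2
        = errs ++ (PySem.List.enumerate rest (done.length : Int)).flatMap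
            (pvEmit1 (pvFirstSeen projects)) := by
  intro rest
  induction rest with
  | nil => intro done seen errs _ _; simp [PySem.List.enumerate_nil]
  | cons it rest ih =>
    intro done seen errs hsplit hseen
    rw [PySem.List.enumerate_cons, List.flatMap_cons, List.foldl_cons]
    by_cases h0 : pvPrefixOf it.2.2 = ""
    · -- empty prefix: both sides skip
      have hstep : pvStepA (seen, errs) it = (seen, errs) := by simp [pvStepA, h0]
      rw [hstep]
      have hemit : pvEmit1 (pvFirstSeen projects) ((done.length : Int), it) = [] := by
        simp [pvEmit1, h0]
      rw [hemit, List.nil_append]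
      have hlen : ((done.length : Int) + 1) = (((done ++ [it]).length : Nat) : Int) := by
        simp
      rw [hlen]
      apply ih (done ++ [it]) seen errs (by simp [hsplit])
      intro q hq
      rw [pvFirstIn_append]
      have hne : pvPrefixOf it.2.2 ≠ q := by
        rw [h0]
        intro h
        exact hq h.symm
      have : pvFirstIn (0 + done.length) [it] q = none := by
        simp [pvFirstIn, hne]
      rw [this, Option.or_none]
      exact hseen q hq
    · have hF : (pvFirstSeen projects).get? (pvPrefixOf it.2.2)
          = (pvFirstIn 0 done (pvPrefixOf it.2.2)).or
              (pvFirstIn (0 + done.length) (it :: rest) (pvPrefixOf it.2.2)) := by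
        rw [pvFirstSeen_char projects _ h0, hsplit, pvFirstIn_append]
      cases hsv : seen.get? (pvPrefixOf it.2.2) with
      | some fn =>
        -- duplicate: A emits, and B's first index lies strictly inside done
        have hmap := (hseen _ h0).symm.trans hsv
        obtain ⟨r, hr, hr2⟩ : ∃ r, pvFirstIn 0 done (pvPrefixOf it.2.2) = some r ∧ r.2 = fn := by
          cases hfi : pvFirstIn 0 done (pvPrefixOf it.2.2) with
          | none => rw [hfi] at hmap; simp at hmap
          | some r => rw [hfi] at hmap; simp at hmap; exact ⟨r, rfl, hmap⟩
        have hbnd := pvFirstIn_bounds done 0 _ r hr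
        have hstep : pvStepA (seen, errs) it = (seen, errs ++ [pvMsg (pvPrefixOf it.2.2) fn it.1]) := by
          simp [pvStepA, h0, hsv]
        rw [hstep]
        have hemit : pvEmit1 (pvFirstSeen projects) ((done.length : Int), it)
            = [pvMsg (pvPrefixOf it.2.2) fn it.1] := by
          rw [pvEmit1]
          simp only [h0, if_false]
          rw [hF, hr]
          simp only [Option.or]
          have : (done.length : Int) ≠ r.1 := by omega
          simp [this, hr2]
        rw [hemit]
        have hlen : ((done.length : Int) + 1) = (((done ++ [it]).length : Nat) : Int) := by simp
        rw [hlen, ih (done ++ [it]) seen (errs ++ [pvMsg (pvPrefixOf it.2.2) fn it.1])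
          (by simp [hsplit])]
        · simp
        · intro q hq
          rw [pvFirstIn_append]
          by_cases hq2 : pvPrefixOf it.2.2 = q
          · subst hq2
            rw [hr]
            simp [Option.or, hsv, hr2]
          · have : pvFirstIn (0 + done.length) [it] q = none := by simp [pvFirstIn, hq2]
            rw [this, Option.or_none]
            exact hseen q hq
      | none =>
        -- first occurrence: A inserts, B's recorded index equals the current one
        have hnone : pvFirstIn 0 done (pvPrefixOf it.2.2) = none := by
          have hmap := (hseen _ h0).symm.trans hsv
          cases hfi : pvFirstIn 0 done (pvPrefixOf it.2.2) with
          | none => rfl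
          | some r => rw [hfi] at hmap; simp at hmap
        have hstep : pvStepA (seen, errs) it = (seen.insert (pvPrefixOf it.2.2) it.1, errs) := by
          simp [pvStepA, h0, hsv]
        rw [hstep]
        have hemit : pvEmit1 (pvFirstSeen projects) ((done.length : Int), it) = [] := by
          rw [pvEmit1]
          simp only [h0, if_false]
          rw [hF, hnone]
          simp [Option.or, pvFirstIn]
        rw [hemit, List.nil_append]
        have hlen : ((done.length : Int) + 1) = (((done ++ [it]).length : Nat) : Int) := by simp
        rw [hlen]
        apply ih (done ++ [it]) _ errs (by simp [hsplit])
        intro q hq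
        rw [pvFirstIn_append]
        by_cases hq2 : q = pvPrefixOf it.2.2
        · subst hq2
          rw [hnone, PySem.Dict.get?_insert_self]
          simp [Option.or, pvFirstIn]
        · rw [PySem.Dict.get?_insert_of_ne _ _ hq2]
          have : pvFirstIn (0 + done.length) [it] q = none := by
            simp [pvFirstIn]
            exact fun h => hq2 h.symm
          rw [this, Option.or_none]
          exact hseen q hq

-- ===== VERDICT (by name: the statement is the Claim_ definition above) =====
theorem check_prefix_conflicts_py_spec : Claim_equal_check_prefix_conflicts_py := by
  intro projects _
  show check_prefix_conflicts_py projects = check_prefix_conflicts_py_alt projects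
  rw [check_prefix_conflicts_py, check_prefix_conflicts_py_alt, pvFoldEmit, List.nil_append]
  have := pvMain projects projects [] PySem.Dict.empty [] rfl
    (by intro q _; simp [PySem.Dict.get?_empty, pvFirstIn])
  simpa using this
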